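-- pv_equiv track=rewrite | github.com/BigPolarBear1/factorization_v3 | QSv3_055_2d_sieving_WIP.py | factorise_fast
-- ===== SOURCE A (Python) =====
-- def factorise_fast(value, factor_base):
--     factors = set()
--     if value < 0:
--         factors ^= {-1}
--         value = -value
--     while value % 2 == 0:
--         factors ^= {2}
--         value //= 2
--     for factor in factor_base:
--         while value % factor == 0:
--             factors ^= {factor}
--             value //= factor
--     return factors, value
-- ===== SOURCE B (Python) =====
-- def factorise_fast(value, factor_base):
--     # Strip factors in PAIRS (divide by f*f), so odd multiplicity shows up directly
--     # as one leftover division; no parity tracking (XOR/counting) is needed.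
--     factors = []
--     if value < 0:
--         factors.append(-1)
--         value = -value
--     for f in [2] + list(factor_base):
--         sq = f * f
--         while value % sq == 0:
--             value //= sq
--         if value % f == 0:
--             factors.append(f)
--             value //= f
--     return set(factors), value
-- ===== Notes on version B (the rewrite author's own statement) =====
-- stated objective: alternative
-- what changed: B strips each factor in pairs (repeatedly dividing by f*f) so odd multiplicity appears directly as a single leftover division that emits the factor; A instead divides by f one at a time while XOR-toggling the factor in a set, and B also folds the sign and the 2-loop into one uniform pass over [2]+factor_base.
import Mathlib
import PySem

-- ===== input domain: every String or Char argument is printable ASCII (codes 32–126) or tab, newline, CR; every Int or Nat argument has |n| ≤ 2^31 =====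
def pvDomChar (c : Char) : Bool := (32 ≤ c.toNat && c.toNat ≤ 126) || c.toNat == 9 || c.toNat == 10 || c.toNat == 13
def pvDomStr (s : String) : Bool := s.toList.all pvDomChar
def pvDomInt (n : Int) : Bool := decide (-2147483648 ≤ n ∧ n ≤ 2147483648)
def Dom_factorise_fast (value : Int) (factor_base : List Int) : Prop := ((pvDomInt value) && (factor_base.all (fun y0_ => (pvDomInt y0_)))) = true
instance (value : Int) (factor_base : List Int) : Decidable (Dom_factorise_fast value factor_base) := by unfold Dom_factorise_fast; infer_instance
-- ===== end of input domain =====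

-- B strips each factor in PAIRS (repeated division by f*f) so odd multiplicity shows up
-- directly as one leftover division, with sign and the 2-loop folded into one uniform pass;
-- no parity tracking (A's XOR-toggling) is needed. Same asymptotic cost ("alternative").

-- ===== PORT A =====
-- 'while value % factor == 0: factors ^= {factor}; value //= factor', fuel-guarded:
-- the fuel only makes the recursion total; on every input admitted by Pre_ the Python
-- loop terminates within the fuel, so the port is exact there.
def pvDivA (f : Int) : Nat → PySem.Set Int × Int → PySem.Set Int × Int
  | 0, st => st
  | fuel+1, (s, v) =>
    if PySem.Int.mod v f = 0 then
      pvDivA f fuel (PySem.Set.symmDiff s [f], PySem.Int.floordiv v f)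
    else (s, v)

def factorise_fast (value : Int) (factor_base : List Int) : List Int × Int :=
  let st0 : PySem.Set Int × Int :=
    if value < 0 then (PySem.Set.symmDiff PySem.Set.empty [-1], -value) else (PySem.Set.empty, value)
  let st1 := pvDivA 2 (st0.2.natAbs + 1) st0
  factor_base.foldl (fun st f => pvDivA f (st.2.natAbs + 1) st) st1

-- ===== PORT B =====
-- 'while value % sq == 0: value //= sq', fuel-guarded exactly like A's loops:
-- on every input admitted by Pre_ the Python loop terminates within the fuel.
def pvSqLoopB (sq : Int) : Nat → Int → Int
  | 0, v => v
  | fuel+1, v =>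
    if PySem.Int.mod v sq = 0 then pvSqLoopB sq fuel (PySem.Int.floordiv v sq) else v

-- the body of B's 'for f in [2] + list(factor_base)' loop
def pvStepB (st : List Int × Int) (f : Int) : List Int × Int :=
  let sq := f * f
  let v := pvSqLoopB sq (st.2.natAbs + 1) st.2
  if PySem.Int.mod v f = 0 then (st.1 ++ [f], PySem.Int.floordiv v f) else (st.1, v)

def factorise_fast_alt (value : Int) (factor_base : List Int) : List Int × Int :=
  let st0 : List Int × Int := if value < 0 then ([-1], -value) else ([], value)
  let st := ([2] ++ factor_base).foldl pvStepB st0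
  (PySem.Set.ofList st.1, st.2)

-- ===== PRECONDITION & SPEC =====
-- Pre_ excludes exactly the inputs on which the Python A does not return: value = 0
-- (the 'while value % 2 == 0' loop never ends) and factor_base containing 0 (ZeroDivisionError)
-- or 1 / -1 (the inner loop never ends).
def Pre_factorise_fast (value : Int) (factor_base : List Int) : Prop :=
  value ≠ 0 ∧ ∀ f ∈ factor_base, f ≠ 0 ∧ f ≠ 1 ∧ f ≠ -1
instance (value : Int) (factor_base : List Int) : Decidable (Pre_factorise_fast value factor_base) := by
  unfold Pre_factorise_fast; infer_instance
def pvWitness_factorise_fast : Int × List Int := (-360, [3, 5, 7])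

def Spec_factorise_fast (value : Int) (factor_base : List Int) (out : List Int × Int) : Prop := out = factorise_fast_alt value factor_base
instance (value : Int) (factor_base : List Int) (out : List Int × Int) : Decidable (Spec_factorise_fast value factor_base out) := by unfold Spec_factorise_fast; infer_instance

-- ===== CLAIM (what is proved, stated in full; the proofs are below) =====
def Claim_equal_factorise_fast : Prop := ∀ (value : Int) (factor_base : List Int), Dom_factorise_fast value factor_base → Pre_factorise_fast value factor_base → Spec_factorise_fast value factor_base (factorise_fast value factor_base)

-- ===== LEMMAS AND PROOFS =====

-- pvCount (proof-only): the canonical 'multiplicity of f in v and the cofactor',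
-- used to characterise both A's toggle loop and B's pair-stripping loop.
def pvCount (f : Int) : Nat → Int → Int → Int × Int
  | 0, e, v => (e, v)
  | fuel+1, e, v =>
    if PySem.Int.mod v f = 0 then
      pvCount f fuel (e + 1) (PySem.Int.floordiv v f)
    else (e, v)

-- toggling f out of / into a set that carries f only possibly at the end
theorem pvTog1 (t : List Int) (f : Int) (h : f ∉ t) : PySem.Set.symmDiff (t ++ [f]) [f] = t := by
  simp [PySem.Set.symmDiff, PySem.Set.diff]
  exact fun a ha => by rintro rfl; exact h ha

theorem pvTog0 (t : List Int) (f : Int) (h : f ∉ t) : PySem.Set.symmDiff t [f] = t ++ [f] := by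
  have h1 : List.filter (fun x => !decide (x = f)) t = t :=
    List.filter_eq_self.mpr (fun a ha => by simp; rintro rfl; exact h ha)
  simp [PySem.Set.symmDiff, PySem.Set.diff, h1, h]

theorem pvTogIf (t : List Int) (f : Int) (b : Bool) (h : f ∉ t) :
    PySem.Set.symmDiff (t ++ if b then [f] else []) [f] = t ++ if !b then [f] else [] := by
  cases b <;> simp [pvTog0, pvTog1, h]

-- the counter's accumulator only shifts the count
theorem pvCount_shift (f : Int) (fuel : Nat) : ∀ (e v : Int),
    pvCount f fuel e v = (e + (pvCount f fuel 0 v).1, (pvCount f fuel 0 v).2) := by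
  induction fuel with
  | zero => intro e v; simp [pvCount]
  | succ n ih =>
    intro e v
    by_cases hm : PySem.Int.mod v f = 0
    · simp only [pvCount, hm, if_pos]
      rw [ih (e + 1), ih (0 + 1)]
      exact Prod.ext (by push_cast; ring) rfl
    · simp [pvCount, hm]

theorem pvCount_nonneg (f : Int) (fuel : Nat) : ∀ v : Int, 0 ≤ (pvCount f fuel 0 v).1 := by
  induction fuel with
  | zero => intro v; simp [pvCount]
  | succ n ih =>
    intro v
    by_cases hm : PySem.Int.mod v f = 0
    · simp only [pvCount, hm, if_pos]
      rw [pvCount_shift]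
      have := ih (PySem.Int.floordiv v f)
      omega
    · simp [pvCount, hm]

theorem pvCount_step (f v : Int) (fuel : Nat) (hm : PySem.Int.mod v f = 0) :
    pvCount f (fuel+1) 0 v
      = (1 + (pvCount f fuel 0 (PySem.Int.floordiv v f)).1,
         (pvCount f fuel 0 (PySem.Int.floordiv v f)).2) := by
  simp only [pvCount, hm, if_pos]
  rw [pvCount_shift]
  norm_num

-- A's toggling loop computes exactly the parity of the canonical count (same fuel)
theorem pvDivA_eq_parity (f : Int) (fuel : Nat) : ∀ (v : Int) (t : List Int) (b : Bool), f ∉ t →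
    pvDivA f fuel (t ++ (if b then [f] else []), v)
      = (t ++ (if b ^^ decide (PySem.Int.mod (pvCount f fuel 0 v).1 2 = 1) then [f] else []),
         (pvCount f fuel 0 v).2) := by
  induction fuel with
  | zero => intro v t b h; simp [pvDivA, pvCount]
  | succ n ih =>
    intro v t b h
    by_cases hm : PySem.Int.mod v f = 0
    · simp only [pvDivA, pvCount, hm, if_pos]
      rw [pvTogIf t f b h, ih (PySem.Int.floordiv v f) t (!b) h,
          pvCount_shift f n (0 + 1) (PySem.Int.floordiv v f)]
      set m := (pvCount f n 0 (PySem.Int.floordiv v f)).1 with hmdef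
      have hb : ((!b) ^^ decide (PySem.Int.mod m 2 = 1))
          = (b ^^ decide (PySem.Int.mod (0 + 1 + m) 2 = 1)) := by
        have h1 : PySem.Int.mod m 2 = m % 2 := PySem.Int.mod_eq_emod_of_pos (by norm_num)
        have h2 : PySem.Int.mod (0 + 1 + m) 2 = (0 + 1 + m) % 2 :=
          PySem.Int.mod_eq_emod_of_pos (by norm_num)
        rw [h1, h2]
        by_cases hp : m % 2 = 1
        · have hq : ¬ ((0 + 1 + m) % 2 = 1) := by omega
          rw [decide_eq_true hp, decide_eq_false hq]
          cases b <;> rfl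
        · have hq : (0 + 1 + m) % 2 = 1 := by omega
          rw [decide_eq_false hp, decide_eq_true hq]
          cases b <;> rfl
      rw [hb]
    · have hc : pvCount f (n + 1) 0 v = (0, v) := by simp [pvCount, hm]
      simp [pvDivA, hm, hc]

-- the counting loop (with enough fuel) fully divides f out of v and keeps v ≠ 0, (result) ∣ v
theorem pvCount_full (f : Int) (hf : 2 ≤ f.natAbs) (fuel : Nat) : ∀ v : Int, v ≠ 0 → v.natAbs < fuel →
    (pvCount f fuel 0 v).2 ≠ 0 ∧ PySem.Int.mod (pvCount f fuel 0 v).2 f ≠ 0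
      ∧ (pvCount f fuel 0 v).2 ∣ v := by
  induction fuel with
  | zero => intro v hv hlt; omega
  | succ n ih =>
    intro v hv hlt
    by_cases hm : PySem.Int.mod v f = 0
    · have hq : PySem.Int.floordiv v f * f = v := by
        have := PySem.Int.floordiv_mul_add_mod v f
        omega
      set q := PySem.Int.floordiv v f with hqdef
      have hq0 : q ≠ 0 := by
        rintro h0; rw [h0, zero_mul] at hq; exact hv hq.symm
      have habs : q.natAbs * f.natAbs = v.natAbs := by
        rw [← Int.natAbs_mul, hq]
      have hqlt : q.natAbs < v.natAbs := by
        have h1 : 1 ≤ q.natAbs := Int.natAbs_pos.mpr hq0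
        nlinarith
      simp only [pvCount, hm, if_pos]
      rw [pvCount_shift]
      obtain ⟨h1, h2, h3⟩ := ih q hq0 (by omega)
      exact ⟨h1, h2, h3.trans ⟨f, hq.symm⟩⟩
    · simp only [pvCount, hm]
      exact ⟨hv, hm, dvd_refl v⟩

-- enough fuel makes the count independent of the exact fuel
theorem pvCount_congr (f : Int) (hf : 2 ≤ f.natAbs) : ∀ n : Nat, ∀ v : Int, v ≠ 0 → v.natAbs ≤ n →
    ∀ fuel fuel' : Nat, v.natAbs < fuel → v.natAbs < fuel' →
    pvCount f fuel 0 v = pvCount f fuel' 0 v := by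
  intro n
  induction n with
  | zero => intro v hv h _ _ _ _; omega
  | succ n ih =>
    intro v hv hle fuel fuel' h1 h2
    obtain ⟨k, rfl⟩ : ∃ k, fuel = k + 1 := ⟨fuel - 1, by omega⟩
    obtain ⟨k', rfl⟩ : ∃ k', fuel' = k' + 1 := ⟨fuel' - 1, by omega⟩
    by_cases hm : PySem.Int.mod v f = 0
    · have hq : PySem.Int.floordiv v f * f = v := by
        have h := PySem.Int.floordiv_mul_add_mod v f
        omega
      set q := PySem.Int.floordiv v f with hqdef
      have hq0 : q ≠ 0 := by rintro h0; rw [h0, zero_mul] at hq; exact hv hq.symm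
      have habs : q.natAbs * f.natAbs = v.natAbs := by rw [← Int.natAbs_mul, hq]
      have hqlt : q.natAbs < v.natAbs := by
        have := Int.natAbs_pos.mpr hq0
        nlinarith
      rw [pvCount_step f v k hm, pvCount_step f v k' hm,
          ih q hq0 (by omega) k (q.natAbs + 1) (by omega) (by omega),
          ih q hq0 (by omega) k' (q.natAbs + 1) (by omega) (by omega)]
    · simp [pvCount, hm]

-- v = cofactor * f^multiplicity
theorem pvCount_spec (f : Int) (hf : 2 ≤ f.natAbs) : ∀ fuel : Nat, ∀ v : Int, v ≠ 0 → v.natAbs < fuel →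
    (pvCount f fuel 0 v).2 * f ^ (pvCount f fuel 0 v).1.toNat = v := by
  intro fuel
  induction fuel with
  | zero => intro v hv h; omega
  | succ n ih =>
    intro v hv hlt
    by_cases hm : PySem.Int.mod v f = 0
    · have hq : PySem.Int.floordiv v f * f = v := by
        have h := PySem.Int.floordiv_mul_add_mod v f
        omega
      set q := PySem.Int.floordiv v f with hqdef
      have hq0 : q ≠ 0 := by rintro h0; rw [h0, zero_mul] at hq; exact hv hq.symm
      have habs : q.natAbs * f.natAbs = v.natAbs := by rw [← Int.natAbs_mul, hq]
      have hqlt : q.natAbs < v.natAbs := by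
        have := Int.natAbs_pos.mpr hq0
        nlinarith
      rw [pvCount_step f v n hm]
      have hge := pvCount_nonneg f n q
      have ihq := ih q hq0 (by omega)
      have htn : (1 + (pvCount f n 0 q).1).toNat = (pvCount f n 0 q).1.toNat + 1 := by omega
      rw [htn, pow_succ, ← mul_assoc, ihq, hq]
    · simp [pvCount, hm]

-- B's pair-stripping loop ends at cofactor·f^(multiplicity mod 2)
theorem pvSq (f : Int) (hf : 2 ≤ f.natAbs) : ∀ n : Nat, ∀ v : Int, v ≠ 0 → v.natAbs ≤ n →
    ∀ fuel fuel2 : Nat, v.natAbs < fuel → v.natAbs < fuel2 →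
    pvSqLoopB (f * f) fuel v
      = if PySem.Int.mod (pvCount f fuel2 0 v).1 2 = 1 then f * (pvCount f fuel2 0 v).2
        else (pvCount f fuel2 0 v).2 := by
  intro n
  induction n with
  | zero => intro v hv h _ _ _ _; omega
  | succ n ih =>
    intro v hv hle fuel fuel2 hfu1 hfu2
    have hfne : f ≠ 0 := by rintro rfl; simp at hf
    obtain ⟨k, rfl⟩ : ∃ k, fuel = k + 1 := ⟨fuel - 1, by omega⟩
    by_cases hm : PySem.Int.mod v (f * f) = 0
    · -- divisible by f²: strip one pair, count drops by two
      have hq : PySem.Int.floordiv v (f * f) * (f * f) = v := by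
        have h := PySem.Int.floordiv_mul_add_mod v (f * f)
        omega
      set q := PySem.Int.floordiv v (f * f) with hqdef
      have hq0 : q ≠ 0 := by rintro h0; rw [h0, zero_mul] at hq; exact hv hq.symm
      have habs : q.natAbs * (f.natAbs * f.natAbs) = v.natAbs := by
        rw [← Int.natAbs_mul f f, ← Int.natAbs_mul, hq]
      have hq1 : 1 ≤ q.natAbs := Int.natAbs_pos.mpr hq0
      have hff : 4 ≤ f.natAbs * f.natAbs := Nat.mul_le_mul hf hf
      have hvge : 4 * q.natAbs ≤ v.natAbs := by
        calc 4 * q.natAbs ≤ (f.natAbs * f.natAbs) * q.natAbs :=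
              Nat.mul_le_mul_right _ hff
          _ = v.natAbs := by rw [mul_comm, habs]
      have hqlt : q.natAbs < v.natAbs := by omega
      have hL : pvSqLoopB (f * f) (k + 1) v = pvSqLoopB (f * f) k q := by
        simp only [pvSqLoopB, hm, if_pos]
        rw [← hqdef]
      have hmf : PySem.Int.mod v f = 0 :=
        (PySem.Int.mod_eq_zero_iff_dvd v f).mpr ⟨q * f, by rw [← hq]; ring⟩
      set u := PySem.Int.floordiv v f with hudef
      have hu : u * f = v := by
        have h := PySem.Int.floordiv_mul_add_mod v f
        rw [← hudef, hmf] at h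
        omega
      have huq : u = q * f := by
        have h : u * f = (q * f) * f := by rw [hu, ← hq]; ring
        exact mul_right_cancel₀ hfne h
      have hmu : PySem.Int.mod u f = 0 :=
        (PySem.Int.mod_eq_zero_iff_dvd u f).mpr ⟨q, by rw [huq]; ring⟩
      have huf : PySem.Int.floordiv u f = q := by
        have h := PySem.Int.floordiv_mul_add_mod u f
        rw [hmu, add_zero] at h
        exact mul_right_cancel₀ hfne (by rw [h, huq])
      obtain ⟨m, rfl⟩ : ∃ m, fuel2 = m + 2 := ⟨fuel2 - 2, by omega⟩
      have hstep1 : pvCount f (m + 1 + 1) 0 v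
          = (1 + (pvCount f (m + 1) 0 u).1, (pvCount f (m + 1) 0 u).2) := by
        have := pvCount_step f v (m + 1) hmf
        rw [← hudef] at this
        exact this
      have hstep2 : pvCount f (m + 1) 0 u
          = (1 + (pvCount f m 0 q).1, (pvCount f m 0 q).2) := by
        have := pvCount_step f u m hmu
        rw [huf] at this
        exact this
      have hcongr : pvCount f m 0 q = pvCount f (q.natAbs + 1) 0 q :=
        pvCount_congr f hf n q hq0 (by omega) m (q.natAbs + 1) (by omega) (by omega)
      rw [hL, ih q hq0 (by omega) k (q.natAbs + 1) (by omega) (by omega),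
          show m + 2 = m + 1 + 1 by ring, hstep1, hstep2, hcongr]
      set e := (pvCount f (q.natAbs + 1) 0 q).1 with hedef
      have h1 : PySem.Int.mod e 2 = e % 2 := PySem.Int.mod_eq_emod_of_pos (by norm_num)
      have h2 : PySem.Int.mod (1 + (1 + e)) 2 = (1 + (1 + e)) % 2 :=
        PySem.Int.mod_eq_emod_of_pos (by norm_num)
      have hiff : (PySem.Int.mod (1 + (1 + e)) 2 = 1) ↔ (PySem.Int.mod e 2 = 1) := by
        rw [h1, h2]; omega
      rw [if_congr hiff rfl rfl]
    · -- not divisible by f²: the loop stops at v, and the multiplicity is 0 or 1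
      have hL : pvSqLoopB (f * f) (k + 1) v = v := by simp [pvSqLoopB, hm]
      set e := (pvCount f fuel2 0 v).1 with hedef
      set w := (pvCount f fuel2 0 v).2 with hwdef
      have hspec : w * f ^ e.toNat = v := pvCount_spec f hf fuel2 v hv hfu2
      have he0 : 0 ≤ e := pvCount_nonneg f fuel2 v
      have hle1 : e.toNat ≤ 1 := by
        by_contra hgt
        have hpow : f ^ e.toNat = f ^ (e.toNat - 2) * (f * f) := by
          have h22 : e.toNat - 2 + 2 = e.toNat := by omega
          calc f ^ e.toNat = f ^ (e.toNat - 2 + 2) := by rw [h22]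
            _ = f ^ (e.toNat - 2) * f ^ 2 := pow_add f _ 2
            _ = f ^ (e.toNat - 2) * (f * f) := by ring
        have hdvd : (f * f) ∣ v := ⟨w * f ^ (e.toNat - 2), by rw [← hspec, hpow]; ring⟩
        exact hm ((PySem.Int.mod_eq_zero_iff_dvd v (f * f)).mpr hdvd)
      have h1 : PySem.Int.mod e 2 = e % 2 := PySem.Int.mod_eq_emod_of_pos (by norm_num)
      rw [hL]
      by_cases hp : PySem.Int.mod e 2 = 1
      · have he1 : e = 1 := by rw [h1] at hp; omega
        rw [if_pos hp, ← hspec, he1]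
        norm_num [mul_comm]
      · have he00 : e = 0 := by rw [h1] at hp; omega
        rw [if_neg hp, ← hspec, he00]
        norm_num

-- B's loop body, characterised by the canonical count
theorem pvStepB_char (f : Int) (hf2 : 2 ≤ f.natAbs) (t : List Int) (v : Int) (hv : v ≠ 0) :
    pvStepB (t, v) f
      = (t ++ (if PySem.Int.mod (pvCount f (v.natAbs + 1) 0 v).1 2 = 1 then [f] else []),
         (pvCount f (v.natAbs + 1) 0 v).2) := by
  have hfne : f ≠ 0 := by rintro rfl; simp at hf2
  have hsq := pvSq f hf2 v.natAbs v hv le_rfl (v.natAbs + 1) (v.natAbs + 1) (by omega) (by omega)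
  obtain ⟨hw0, hwnd, hwdvd⟩ := pvCount_full f hf2 (v.natAbs + 1) v hv (by omega)
  set e := (pvCount f (v.natAbs + 1) 0 v).1 with hedef
  set w := (pvCount f (v.natAbs + 1) 0 v).2 with hwdef
  show (if PySem.Int.mod (pvSqLoopB (f * f) (v.natAbs + 1) v) f = 0
        then (t ++ [f], PySem.Int.floordiv (pvSqLoopB (f * f) (v.natAbs + 1) v) f)
        else (t, pvSqLoopB (f * f) (v.natAbs + 1) v))
      = (t ++ (if PySem.Int.mod e 2 = 1 then [f] else []), w)
  rw [hsq]
  by_cases hp : PySem.Int.mod e 2 = 1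
  · rw [if_pos hp, if_pos hp]
    have hm : PySem.Int.mod (f * w) f = 0 :=
      (PySem.Int.mod_eq_zero_iff_dvd (f * w) f).mpr (dvd_mul_right f w)
    rw [if_pos hm]
    have hfd : PySem.Int.floordiv (f * w) f = w := by
      have h := PySem.Int.floordiv_mul_add_mod (f * w) f
      rw [hm, add_zero] at h
      exact mul_right_cancel₀ hfne (by rw [h]; ring)
    rw [hfd]
  · rw [if_neg hp, if_neg hp, if_neg hwnd, List.append_nil]

-- appending a conditional singleton keeps the list duplicate-free / is drawn from t or {f}
theorem pvNodupApp (t : List Int) (f : Int) (c : Prop) [Decidable c]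
    (hnd : t.Nodup) (hft : f ∉ t) : (t ++ if c then [f] else []).Nodup := by
  by_cases hp : c
  · rw [if_pos hp]
    simp only [List.nodup_append, List.nodup_singleton]
    exact ⟨hnd, trivial, fun a ha b hb => by simp at hb; subst hb; rintro rfl; exact hft ha⟩
  · rw [if_neg hp]
    simpa using hnd

theorem pvMemApp (t : List Int) (f x : Int) (c : Prop) [Decidable c]
    (hx : x ∈ t ++ if c then [f] else []) : x ∈ t ∨ x = f := by
  rcases List.mem_append.mp hx with h | h
  · exact Or.inl h
  · by_cases hp : c
    · rw [if_pos hp] at h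
      exact Or.inr (by simpa using h)
    · rw [if_neg hp] at h
      exact absurd h (List.not_mem_nil)

-- the two folds over the factor base agree and keep the factor list duplicate-free
theorem pvFoldEq (fb : List Int) : ∀ (t : List Int) (v : Int),
    (∀ f ∈ fb, f ≠ 0 ∧ f ≠ 1 ∧ f ≠ -1) → v ≠ 0 → t.Nodup →
    (∀ x ∈ t, x = -1 ∨ ¬ x ∣ v) →
    fb.foldl (fun st f => pvDivA f (st.2.natAbs + 1) st) (t, v) = fb.foldl pvStepB (t, v)
      ∧ (fb.foldl pvStepB (t, v)).1.Nodup := by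
  induction fb with
  | nil => intro t v _ _ hnd _; exact ⟨rfl, hnd⟩
  | cons f fb ih =>
    intro t v hfb hv hnd hinv
    obtain ⟨hf0, hf1, hfm1⟩ := hfb f List.mem_cons_self
    have hfb' := fun g hg => hfb g (List.mem_cons_of_mem f hg)
    have hf2 : 2 ≤ f.natAbs := by omega
    simp only [List.foldl_cons]
    obtain ⟨hw0, hwnd, hwdvd⟩ := pvCount_full f hf2 (v.natAbs + 1) v hv (by omega)
    have hBchar := pvStepB_char f hf2 t v hv
    by_cases hm : PySem.Int.mod v f = 0
    · have hdvd : f ∣ v := (PySem.Int.mod_eq_zero_iff_dvd v f).mp hm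
      have hft : f ∉ t := by
        intro hmem
        rcases hinv f hmem with h | h
        · exact hfm1 h
        · exact h hdvd
      have hAchar : pvDivA f (v.natAbs + 1) (t, v)
          = (t ++ (if PySem.Int.mod (pvCount f (v.natAbs + 1) 0 v).1 2 = 1 then [f] else []),
             (pvCount f (v.natAbs + 1) 0 v).2) := by
        have h := pvDivA_eq_parity f (v.natAbs + 1) v t false hft
        simpa using h
      rw [hAchar, hBchar]
      refine ih _ _ hfb' hw0 (pvNodupApp t f _ hnd hft) ?_
      intro x hx
      rcases pvMemApp t f x _ hx with hx | hx
      · rcases hinv x hx with h | h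
        · exact Or.inl h
        · exact Or.inr (fun hc => h (hc.trans hwdvd))
      · subst hx
        exact Or.inr (fun hc => hwnd ((PySem.Int.mod_eq_zero_iff_dvd _ _).mpr hc))
    · have hcnt : pvCount f (v.natAbs + 1) 0 v = (0, v) := by simp [pvCount, hm]
      have hA : pvDivA f (v.natAbs + 1) (t, v) = (t, v) := by simp [pvDivA, hm]
      have hB : pvStepB (t, v) f = (t, v) := by
        rw [hBchar, hcnt]
        simp
      rw [hA, hB]
      exact ih _ _ hfb' hv hnd hinv

-- assembling: sign handling, the 2-step, then the factor-base folds
theorem pvMain (fb : List Int) (hfb : ∀ f ∈ fb, f ≠ 0 ∧ f ≠ 1 ∧ f ≠ -1)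
    (t0 : List Int) (v0 : Int) (h2 : (2 : Int) ∉ t0) (h3 : v0 ≠ 0)
    (hnd : t0.Nodup) (hm1 : ∀ x ∈ t0, x = -1) :
    fb.foldl (fun st f => pvDivA f (st.2.natAbs + 1) st) (pvDivA 2 (v0.natAbs + 1) (t0, v0))
      = fb.foldl pvStepB (pvStepB (t0, v0) 2)
    ∧ (fb.foldl pvStepB (pvStepB (t0, v0) 2)).1.Nodup := by
  have hf2 : 2 ≤ (2 : Int).natAbs := by decide
  obtain ⟨hw0, hwnd, hwdvd⟩ := pvCount_full 2 hf2 (v0.natAbs + 1) v0 h3 (by omega)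
  have hAchar : pvDivA 2 (v0.natAbs + 1) (t0, v0)
      = (t0 ++ (if PySem.Int.mod (pvCount 2 (v0.natAbs + 1) 0 v0).1 2 = 1 then [2] else []),
         (pvCount 2 (v0.natAbs + 1) 0 v0).2) := by
    have h := pvDivA_eq_parity 2 (v0.natAbs + 1) v0 t0 false h2
    simpa using h
  have hBchar := pvStepB_char 2 hf2 t0 v0 h3
  rw [hAchar, hBchar]
  refine pvFoldEq fb _ _ hfb hw0 (pvNodupApp t0 2 _ hnd h2) ?_
  intro x hx
  rcases pvMemApp t0 2 x _ hx with hx | hx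
  · exact Or.inl (hm1 x hx)
  · subst hx
    exact Or.inr (fun hc => hwnd ((PySem.Int.mod_eq_zero_iff_dvd _ _).mpr hc))

theorem pvSym : PySem.Set.symmDiff (PySem.Set.empty : List Int) [-1] = [-1] := by decide

-- ===== VERDICT (by name: the statement is the Claim_ definition above) =====
theorem factorise_fast_spec : Claim_equal_factorise_fast := by
  intro value factor_base _ hpre
  obtain ⟨hv0, hfb⟩ := hpre
  unfold Spec_factorise_fast factorise_fast factorise_fast_alt
  simp only [List.cons_append, List.nil_append, List.foldl_cons]
  by_cases hneg : value < 0
  · simp only [if_pos hneg, pvSym]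
    obtain ⟨heq, hnd⟩ := pvMain factor_base hfb [-1] (-value)
      (by decide) (by omega) (by decide) (by simp)
    rw [PySem.Set.ofList_eq_self_of_nodup _ hnd, Prod.mk.eta]
    exact heq
  · simp only [if_neg hneg]
    obtain ⟨heq, hnd⟩ := pvMain factor_base hfb [] value
      (by simp) hv0 (by simp) (by simp)
    rw [PySem.Set.ofList_eq_self_of_nodup _ hnd, Prod.mk.eta]
    exact heq
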